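-- pv_equiv track=rewrite | github.com/asweigart/programmedpatterns | book/visualpatterns.py | formula26
-- ===== SOURCE A (Python) =====
-- def formula26(step):
--     count = 1
--     i = 2
--     while True:
--         if i > step:
--             break
--         count += 1
--         i += 1
--
--         if i > step:
--             break
--         count += 0
--         i += 1
--
--         if i > step:
--             break
--         count += 0
--         i += 1
--
--     return count
-- ===== SOURCE B (Python) =====
-- def formula26(step):
--     # Closed form for A's unrolled counting loop: count grows once per
--     # three i-increments starting from i = 2, so the answer is a floor
--     # division away.
--     if step < 2:
--         return 1
--     return 2 + (step - 2) // 3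
-- ===== Notes on version B (the rewrite author's own statement) =====
-- stated objective: faster
-- what changed: Replaced the linear three-way unrolled counting loop by a constant-time closed-form floor-division formula.
import Mathlib
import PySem

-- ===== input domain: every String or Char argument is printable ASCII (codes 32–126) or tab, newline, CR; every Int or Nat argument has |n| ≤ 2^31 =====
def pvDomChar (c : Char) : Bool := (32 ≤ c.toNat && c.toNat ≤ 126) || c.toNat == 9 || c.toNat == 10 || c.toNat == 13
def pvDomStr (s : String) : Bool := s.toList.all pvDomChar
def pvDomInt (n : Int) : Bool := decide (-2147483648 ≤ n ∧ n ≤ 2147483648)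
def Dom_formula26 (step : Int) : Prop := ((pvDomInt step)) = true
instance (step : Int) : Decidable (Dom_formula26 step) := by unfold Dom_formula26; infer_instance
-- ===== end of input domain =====

-- B replaces A's O(step) unrolled counting loop by a closed-form formula (objective: faster).

-- ===== PORT A =====
-- A's 'while True' loop, unrolled three steps per iteration exactly as in the Python.
def formula26Loop (step count i : Int) : Int :=
  if i > step then count
  else
    -- count += 1; i += 1
    let count1 := count + 1
    let i1 := i + 1
    if i1 > step then count1
    else
      -- count += 0; i += 1
      let i2 := i1 + 1
      if i2 > step then count1
      else
        -- count += 0; i += 1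
        formula26Loop step count1 (i2 + 1)
termination_by (step + 1 - i).toNat
decreasing_by omega

def formula26 (step : Int) : Int := formula26Loop step 1 2

-- ===== PORT B =====
def formula26_alt (step : Int) : Int :=
  if step < 2 then 1
  else 2 + PySem.Int.floordiv (step - 2) 3

-- ===== PRECONDITION & SPEC =====
def Spec_formula26 (step : Int) (out : Int) : Prop := out = formula26_alt step
instance (step : Int) (out : Int) : Decidable (Spec_formula26 step out) := by unfold Spec_formula26; infer_instance

-- ===== CLAIM (what is proved, stated in full; the proofs are below) =====
def Claim_equal_formula26 : Prop := ∀ (step : Int), Dom_formula26 step → Spec_formula26 step (formula26 step)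

-- ===== LEMMAS AND PROOFS =====
theorem formula26Loop_closed (step i count : Int) (hi : i ≤ step) :
    formula26Loop step count i = count + 1 + PySem.Int.floordiv (step - i) 3 := by
  have h3 : (0:Int) < 3 := by norm_num
  induction hnat : (step + 1 - i).toNat using Nat.strong_induction_on generalizing i count with
  | _ n ih =>
    rw [formula26Loop]
    rw [if_neg (by omega)]
    by_cases h1 : i + 1 > step
    · simp only [if_pos h1]
      have : step - i = 0 := by omega
      rw [this]
      simp [PySem.Int.floordiv]
    · rw [if_neg h1]
      by_cases h2 : i + 1 + 1 > step
      · rw [if_pos h2]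
        have : step - i = 1 := by omega
        rw [this]
        have : PySem.Int.floordiv 1 3 = 0 := by decide
        rw [this]; ring
      · rw [if_neg h2]
        by_cases h3' : i + 3 ≤ step
        · have := ih ((step + 1 - (i + 1 + 1 + 1)).toNat) (by omega) (i + 1 + 1 + 1) (count + 1) (by omega) rfl
          rw [this]
          have hstep : PySem.Int.floordiv (step - i) 3 = PySem.Int.floordiv (step - (i + 1 + 1 + 1)) 3 + 1 := by
            rw [PySem.Int.floordiv_eq_ediv_of_pos h3, PySem.Int.floordiv_eq_ediv_of_pos h3]
            omega
          rw [hstep]; ring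
        · -- i + 2 ≤ step < i + 3, so step = i + 2; inner call returns immediately
          rw [formula26Loop]
          rw [if_pos (by omega)]
          have : step - i = 2 := by omega
          rw [this]
          have : PySem.Int.floordiv 2 3 = 0 := by decide
          rw [this]; ring

-- ===== VERDICT (by name: the statement is the Claim_ definition above) =====
theorem formula26_spec : Claim_equal_formula26 := by
  intro step _
  unfold Spec_formula26 formula26 formula26_alt
  by_cases h : step < 2
  · rw [formula26Loop, if_pos (by omega), if_pos h]
  · rw [formula26Loop_closed step 2 1 (by omega), if_neg h]
    ring
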